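-- pv_equiv track=rewrite | github.com/Timjaris/A-Bunch-of-Miscellaneous-Programs | SavingTheWorld.py | greedyBestHack
-- ===== SOURCE A (Python) =====
-- def getDamage(s):
--     strenth = 1
--     damage = 0
--     for c in s:
--         if c=='C':
--             strenth*=2
--         if c=='S':
--             damage+=strenth
--     return damage
--
-- def hack(s, pos):
--     new = ''
--     for i in range(len(s)):
--         if i!=pos and i!=pos+1:
--             new+=s[i]
--         elif i==pos:
--             new+=s[i+1]
--         elif i==pos+1:
--             new+=s[i-1]
--     return new
--
-- def greedyBestHack(s):
--     best = getDamage(s)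
--     result = s
--     for i in range(len(s)-1):
--         swapped = hack(s, i)
--         d = getDamage(swapped)
--         if d < best:
--             best=d
--             result=swapped
--     return result
-- ===== SOURCE B (Python) =====
-- def greedyBestHack(s):
--     # The damage only drops when a 'C' immediately followed by an 'S' is swapped,
--     # and the drop is 2**(number of C's before it) -- strictly larger for later
--     # "CS" pairs.  So the best single swap is at the LAST occurrence of "CS".
--     for i in range(len(s) - 2, -1, -1):
--         if s[i] == 'C' and s[i + 1] == 'S':
--             return s[:i] + 'SC' + s[i + 2:]
--     return s
-- ===== Notes on version B (the rewrite author's own statement) =====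
-- stated objective: faster
-- what changed: Instead of recomputing the damage of every adjacent swap (O(n) per swap), B uses the fact that a swap strictly decreases damage exactly at a 'CS' pair, by 2^(#C before it), which is strictly larger for later pairs, so it swaps at the last occurrence of 'CS' found by one backward scan.
import Mathlib
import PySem

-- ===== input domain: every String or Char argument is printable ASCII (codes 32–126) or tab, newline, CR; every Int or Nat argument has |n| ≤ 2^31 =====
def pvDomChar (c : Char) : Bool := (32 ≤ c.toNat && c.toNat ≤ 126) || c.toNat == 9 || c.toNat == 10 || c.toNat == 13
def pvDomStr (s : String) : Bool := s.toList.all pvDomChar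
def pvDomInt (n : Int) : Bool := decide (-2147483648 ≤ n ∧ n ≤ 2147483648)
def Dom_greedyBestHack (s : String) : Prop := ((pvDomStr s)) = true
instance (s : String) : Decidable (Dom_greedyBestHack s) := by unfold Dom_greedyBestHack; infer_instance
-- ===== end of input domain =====

-- B replaces A's try-every-adjacent-swap search (recomputing the damage of each candidate)
-- by one backward scan that swaps the last "CS" pair; objective: faster.

-- ===== PORT A =====
def getDamage (s : String) : Int :=
  (s.toList.foldl (fun (p : Int × Int) c =>
      let p := if c = 'C' then (p.1 * 2, p.2) else p
      if c = 'S' then (p.1, p.2 + p.1) else p) (1, 0)).2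

-- s[i] indices are always in range at hack's call sites (0 ≤ pos ≤ len-2), so pyGetD's
-- default is never used.
def hack (s : String) (pos : Int) : String :=
  let l := s.toList
  String.ofList ((PySem.List.pyRange 0 (l.length : Int) 1).foldl (fun new i =>
    if i ≠ pos ∧ i ≠ pos + 1 then new ++ [PySem.List.pyGetD l i ' ']
    else if i = pos then new ++ [PySem.List.pyGetD l (i + 1) ' ']
    else new ++ [PySem.List.pyGetD l (i - 1) ' ']) [])

def greedyBestHack (s : String) : String :=
  let best := getDamage s
  ((PySem.List.pyRange 0 ((s.toList.length : Int) - 1) 1).foldl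
    (fun (st : Int × String) i =>
      let swapped := hack s i
      let d := getDamage swapped
      if d < st.1 then (d, swapped) else st) (best, s)).2

-- ===== PORT B =====
-- the backward loop "for i in range(len(s)-2, -1, -1)": fuel k+1 means current index k
def findBackCS (l : List Char) : Nat → Option Nat
  | 0 => none
  | k + 1 => if l.getD k ' ' = 'C' ∧ l.getD (k + 1) ' ' = 'S' then some k else findBackCS l k

def greedyBestHack_alt (s : String) : String :=
  let l := s.toList
  match findBackCS l (l.length - 1) with
  | none => s
  | some i =>
      String.ofList (PySem.List.slice l none (some (i : Int)) ++ ['S', 'C'] ++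
                     PySem.List.slice l (some ((i : Int) + 2)) none)

-- ===== PRECONDITION & SPEC =====
def Spec_greedyBestHack (s : String) (out : String) : Prop := out = greedyBestHack_alt s
instance (s : String) (out : String) : Decidable (Spec_greedyBestHack s out) := by unfold Spec_greedyBestHack; infer_instance

-- ===== CLAIM =====
def Claim_equal_greedyBestHack : Prop := ∀ (s : String), Dom_greedyBestHack s → Spec_greedyBestHack s (greedyBestHack s)

-- ===== LEMMAS AND PROOFS =====

/-- damage of a suffix entered with strength 1 -/
def dmg : List Char → Int
  | [] => 0
  | c :: t => if c = 'C' then 2 * dmg t else if c = 'S' then 1 + dmg t else dmg t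

/-- strength multiplier accumulated over a block -/
def p2 (l : List Char) : Int := 2 ^ (l.count 'C')

/-- damage change caused by swapping the adjacent pair x,y -/
def δCS (x y : Char) : Int :=
  if x = 'C' ∧ y = 'S' then -1 else if x = 'S' ∧ y = 'C' then 1 else 0

def swapAt (l : List Char) (i : Nat) : List Char :=
  l.take i ++ [l.getD (i + 1) ' ', l.getD i ' '] ++ l.drop (i + 2)

theorem dmg_nil : dmg [] = 0 := rfl

theorem dmg_cons (c : Char) (t : List Char) :
    dmg (c :: t) = (if c = 'C' then 2 else 1) * dmg t + (if c = 'S' then 1 else 0) := by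
  by_cases hC : c = 'C'
  · have hS : ¬ c = 'S' := by rw [hC]; decide
    simp only [dmg, if_pos hC, if_neg hS]; ring
  · by_cases hS : c = 'S'
    · simp only [dmg, if_neg hC, if_pos hS]; ring
    · simp only [dmg, if_neg hC, if_neg hS]; ring

theorem p2_cons (c : Char) (t : List Char) :
    p2 (c :: t) = (if c = 'C' then 2 else 1) * p2 t := by
  by_cases hC : c = 'C' <;> simp [p2, hC, pow_succ] <;> ring

theorem p2_pos (l : List Char) : 0 < p2 l := pow_pos (by norm_num) _

theorem dmg_append (a b : List Char) : dmg (a ++ b) = dmg a + p2 a * dmg b := by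
  induction a with
  | nil => simp [dmg, p2]
  | cons c t ih =>
    rw [List.cons_append, dmg_cons, dmg_cons, p2_cons, ih]
    split_ifs <;> ring

theorem dmg_fold (l : List Char) (st d : Int) :
    l.foldl (fun (p : Int × Int) c =>
      let p := if c = 'C' then (p.1 * 2, p.2) else p
      if c = 'S' then (p.1, p.2 + p.1) else p) (st, d)
    = (st * p2 l, d + st * dmg l) := by
  induction l generalizing st d with
  | nil => simp [p2, dmg]
  | cons c t ih =>
    rw [List.foldl_cons]
    by_cases hC : c = 'C'
    · have hS : ¬ c = 'S' := by rw [hC]; decide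
      simp only [if_pos hC, if_neg hS]
      rw [ih, p2_cons, dmg_cons]
      simp only [if_pos hC, if_neg hS, Prod.mk.injEq]
      constructor <;> ring
    · by_cases hS : c = 'S'
      · simp only [if_neg hC, if_pos hS]
        rw [ih, p2_cons, dmg_cons]
        simp only [if_neg hC, if_pos hS, Prod.mk.injEq]
        constructor <;> ring
      · simp only [if_neg hC, if_neg hS]
        rw [ih, p2_cons, dmg_cons]
        simp only [if_neg hC, if_neg hS, Prod.mk.injEq]
        constructor <;> ring

theorem getDamage_eq (s : String) : getDamage s = dmg s.toList := by
  unfold getDamage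
  rw [dmg_fold]
  simp

theorem dmg_pair_swap (x y : Char) : dmg [y, x] = dmg [x, y] + δCS x y := by
  simp only [dmg_cons, dmg_nil]
  unfold δCS
  split_ifs <;> simp_all

theorem p2_pair (x y : Char) : p2 [y, x] = p2 [x, y] := by
  unfold p2
  rw [List.Perm.count_eq (List.Perm.swap x y [])]

theorem p2_append (a b : List Char) : p2 (a ++ b) = p2 a * p2 b := by
  simp [p2, List.count_append, pow_add]

theorem list_decomp (l : List Char) (i : Nat) (h : i + 1 < l.length) :
    l = l.take i ++ [l.getD i ' ', l.getD (i + 1) ' '] ++ l.drop (i + 2) := by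
  have h0 : i < l.length := by omega
  have h1 : l.drop i = l[i] :: l.drop (i + 1) := List.drop_eq_getElem_cons h0
  have h2 : l.drop (i + 1) = l[i+1] :: l.drop (i + 2) := List.drop_eq_getElem_cons h
  rw [List.getD_eq_getElem l ' ' h0, List.getD_eq_getElem l ' ' h]
  conv_lhs => rw [← List.take_append_drop i l]
  rw [h1, h2]
  simp

theorem dmg_swapAt (l : List Char) (i : Nat) (h : i + 1 < l.length) :
    dmg (swapAt l i) = dmg l + p2 (l.take i) * δCS (l.getD i ' ') (l.getD (i + 1) ' ') := by
  unfold swapAt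
  have hldec := list_decomp l i h
  set x := l.getD i ' ' with hx
  set y := l.getD (i + 1) ' ' with hy
  set u := l.take i with hu
  set v := l.drop (i + 2) with hv
  conv_rhs => rw [hldec]
  simp only [dmg_append, p2_append]
  rw [p2_pair, dmg_pair_swap]
  ring

-- ===== characterizing A's loop =====

theorem findBackCS_sound (l : List Char) :
    ∀ (k j : Nat), findBackCS l k = some j →
      j < k ∧ l.getD j ' ' = 'C' ∧ l.getD (j + 1) ' ' = 'S' := by
  intro k
  induction k with
  | zero => intro j hj; simp [findBackCS] at hj
  | succ k ih =>
    intro j hj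
    unfold findBackCS at hj
    split_ifs at hj with hcs
    · cases hj; exact ⟨by omega, hcs⟩
    · obtain ⟨h1, h2⟩ := ih j hj
      exact ⟨by omega, h2⟩

theorem count_take_lt (l : List Char) (j k : Nat) (hjk : j < k) (hj : j < l.length)
    (hC : l.getD j ' ' = 'C') : (l.take j).count 'C' < (l.take k).count 'C' := by
  have h1 : l.take (j + 1) = l.take j ++ [l[j]] := List.take_succ_eq_append_getElem hj
  have h2 : (l.take (j + 1)).count 'C' = (l.take j).count 'C' + 1 := by
    rw [h1, List.count_append]
    rw [List.getD_eq_getElem l ' ' hj] at hC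
    simp [hC]
  have h3 : l.take (j + 1) <+: l.take k := List.take_prefix_take_left hjk
  have h4 := h3.count_le 'C'
  omega

theorem p2_take_lt (l : List Char) (j k : Nat) (hjk : j < k) (hj : j < l.length)
    (hC : l.getD j ' ' = 'C') : p2 (l.take j) < p2 (l.take k) :=
  pow_lt_pow_right₀ (by norm_num) (count_take_lt l j k hjk hj hC)

theorem map_pyGetD_take (l : List Char) :
    ∀ (m : Nat), m ≤ l.length →
      (PySem.List.pyRange 0 (m : Int) 1).map (fun k => PySem.List.pyGetD l k ' ') = l.take m := by
  intro m
  induction m with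
  | zero => intro _; simp
  | succ m ih =>
    intro hm
    rw [show ((m + 1 : Nat) : Int) = (m : Int) + 1 by push_cast; ring,
        PySem.List.pyRange_one_succ_right (by positivity), List.map_append, ih (by omega)]
    rw [List.take_succ_eq_append_getElem (show m < l.length by omega)]
    simp [PySem.List.pyGetD_natCast, List.getD_eq_getElem?_getD,
          List.getElem?_eq_getElem (show m < l.length by omega)]

theorem hack_eq (s : String) (i : Nat) (h : i + 1 < s.toList.length) :
    (hack s (i : Int)).toList = swapAt s.toList i := by
  unfold hack
  rw [String.toList_ofList]
  set l := s.toList with hl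
  have hfun : (fun (new : List Char) (x : Int) =>
      if x ≠ (i : Int) ∧ x ≠ (i : Int) + 1 then new ++ [PySem.List.pyGetD l x ' ']
      else if x = (i : Int) then new ++ [PySem.List.pyGetD l (x + 1) ' ']
      else new ++ [PySem.List.pyGetD l (x - 1) ' '])
      = fun new x => new ++ [if x ≠ (i : Int) ∧ x ≠ (i : Int) + 1 then PySem.List.pyGetD l x ' '
          else if x = (i : Int) then PySem.List.pyGetD l (x + 1) ' '
          else PySem.List.pyGetD l (x - 1) ' '] := by
    funext new x; split_ifs <;> rfl
  rw [hfun, PySem.List.foldl_append_singleton_eq_map, List.nil_append]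
  rw [PySem.List.pyRange_one_append 0 (i : Int) (l.length : Int) (by positivity)
        (by exact_mod_cast Nat.le_of_lt (by omega)),
      PySem.List.pyRange_one_append (i : Int) ((i : Int) + 2) (l.length : Int) (by omega)
        (by exact_mod_cast (by omega : i + 2 ≤ l.length))]
  rw [List.map_append, List.map_append]
  have hc1 : ∀ x ∈ PySem.List.pyRange 0 (i : Int) 1,
      (if x ≠ (i : Int) ∧ x ≠ (i : Int) + 1 then PySem.List.pyGetD l x ' '
       else if x = (i : Int) then PySem.List.pyGetD l (x + 1) ' '
       else PySem.List.pyGetD l (x - 1) ' ') = PySem.List.pyGetD l x ' ' := by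
    intro x hx
    rw [PySem.List.mem_pyRange_one] at hx
    exact if_pos ⟨by omega, by omega⟩
  have hc3 : ∀ x ∈ PySem.List.pyRange ((i : Int) + 2) (l.length : Int) 1,
      (if x ≠ (i : Int) ∧ x ≠ (i : Int) + 1 then PySem.List.pyGetD l x ' '
       else if x = (i : Int) then PySem.List.pyGetD l (x + 1) ' '
       else PySem.List.pyGetD l (x - 1) ' ') = PySem.List.pyGetD l x ' ' := by
    intro x hx
    rw [PySem.List.mem_pyRange_one] at hx
    exact if_pos ⟨by omega, by omega⟩
  rw [List.map_congr_left hc1, List.map_congr_left hc3, map_pyGetD_take l i (by omega)]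
  have hmap := PySem.List.map_pyGetD_pyRange' l ' ' (show (0 : Int) ≤ (i : Int) + 2 by positivity)
  rw [show ((i : Int) + 2).toNat = i + 2 by omega] at hmap
  rw [hmap]
  have hpart2 : (PySem.List.pyRange (i : Int) ((i : Int) + 2) 1).map (fun x =>
      if x ≠ (i : Int) ∧ x ≠ (i : Int) + 1 then PySem.List.pyGetD l x ' '
      else if x = (i : Int) then PySem.List.pyGetD l (x + 1) ' '
      else PySem.List.pyGetD l (x - 1) ' ') = [l.getD (i + 1) ' ', l.getD i ' '] := by
    rw [PySem.List.pyRange_one_cons (by omega)]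
    rw [show PySem.List.pyRange ((i : Int) + 1) ((i : Int) + 2) 1 = [(i : Int) + 1] from by
      rw [show (i : Int) + 2 = ((i : Int) + 1) + 1 by ring]
      exact PySem.List.pyRange_one_singleton _]
    simp only [List.map_cons, List.map_nil]
    have h1 : ¬ ((i : Int) ≠ (i : Int) ∧ (i : Int) ≠ (i : Int) + 1) := by omega
    have h2 : ¬ ((i : Int) + 1 ≠ (i : Int) ∧ (i : Int) + 1 ≠ (i : Int) + 1) := by omega
    have h3 : ¬ ((i : Int) + 1 = (i : Int)) := by omega
    rw [if_neg h1, if_neg h2, if_neg h3, if_true]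
    rw [show (i : Int) + 1 - 1 = (i : Int) by ring,
        show (i : Int) + 1 = ((i + 1 : Nat) : Int) by push_cast; ring]
    rw [PySem.List.pyGetD_natCast, PySem.List.pyGetD_natCast]
  rw [hpart2]
  simp [swapAt]

theorem getDamage_hack (s : String) (k : Nat) (h : k + 1 < s.toList.length) :
    getDamage (hack s (k : Int))
      = dmg s.toList + p2 (s.toList.take k) * δCS (s.toList.getD k ' ') (s.toList.getD (k + 1) ' ') := by
  rw [getDamage_eq, hack_eq s k h, dmg_swapAt s.toList k h]

theorem δCS_nonneg (x y : Char) (h : ¬ (x = 'C' ∧ y = 'S')) : 0 ≤ δCS x y := by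
  unfold δCS; split_ifs <;> omega

theorem loop_inv (s : String) :
    ∀ (k : Nat), k ≤ s.toList.length - 1 →
      (PySem.List.pyRange 0 (k : Int) 1).foldl
        (fun (st : Int × String) i =>
          let swapped := hack s i
          let d := getDamage swapped
          if d < st.1 then (d, swapped) else st) (getDamage s, s)
      = match findBackCS s.toList k with
        | none => (getDamage s, s)
        | some j => (getDamage s - p2 (s.toList.take j), hack s (j : Int)) := by
  intro k
  induction k with
  | zero => intro _; simp [findBackCS]
  | succ k ih =>
    intro hk
    have hkn : k + 1 < s.toList.length := by omega
    rw [show ((k + 1 : Nat) : Int) = (k : Int) + 1 by push_cast; ring,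
        PySem.List.pyRange_one_succ_right (by positivity), List.foldl_append, ih (by omega)]
    simp only [List.foldl_cons, List.foldl_nil]
    have hd := getDamage_hack s k hkn
    by_cases hcs : s.toList.getD k ' ' = 'C' ∧ s.toList.getD (k + 1) ' ' = 'S'
    · have hdval : getDamage (hack s (k : Int)) = dmg s.toList - p2 (s.toList.take k) := by
        rw [hd, δCS, if_pos hcs]; ring
      cases hfb : findBackCS s.toList k with
      | none =>
        split_ifs with hlt
        · unfold findBackCS
          rw [if_pos hcs, hdval, getDamage_eq s]
        · exfalso
          have hlt' : getDamage (hack s (k : Int)) < getDamage s := by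
            rw [hdval, getDamage_eq s]
            have := p2_pos (s.toList.take k)
            omega
          exact hlt hlt'
      | some j =>
        obtain ⟨hjk, hjC, _⟩ := findBackCS_sound s.toList k j hfb
        split_ifs with hlt
        · unfold findBackCS
          rw [if_pos hcs, hdval, getDamage_eq s]
        · exfalso
          have hlt' : getDamage (hack s (k : Int)) < getDamage s - p2 (s.toList.take j) := by
            rw [hdval, getDamage_eq s]
            have := p2_take_lt s.toList j k hjk (by omega) hjC
            omega
          exact hlt hlt'
    · have hge : dmg s.toList ≤ getDamage (hack s (k : Int)) := by
        rw [hd]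
        have h1 := δCS_nonneg _ _ hcs
        have h2 := p2_pos (s.toList.take k)
        nlinarith
      have hge' : getDamage s ≤ getDamage (hack s (k : Int)) := by
        rw [getDamage_eq s]; exact hge
      cases hfb : findBackCS s.toList k with
      | none =>
        split_ifs with hlt
        · exact absurd hlt (not_lt.mpr hge')
        · unfold findBackCS
          rw [if_neg hcs, hfb]
      | some j =>
        split_ifs with hlt
        · exfalso
          have hle : getDamage s - p2 (s.toList.take j) ≤ getDamage (hack s (k : Int)) := by
            have := p2_pos (s.toList.take j)
            omega
          exact absurd hlt (not_lt.mpr hle)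
        · unfold findBackCS
          rw [if_neg hcs, hfb]

-- ===== VERDICT =====
theorem greedyBestHack_spec : Claim_equal_greedyBestHack := by
  unfold Claim_equal_greedyBestHack
  intro s _
  unfold Spec_greedyBestHack greedyBestHack greedyBestHack_alt
  have hrange : PySem.List.pyRange 0 ((s.toList.length : Int) - 1) 1
      = PySem.List.pyRange 0 ((s.toList.length - 1 : Nat) : Int) 1 := by
    rcases Nat.eq_zero_or_pos s.toList.length with h | h
    · rw [h]; rfl
    · congr 1; omega
  rw [hrange]
  have hmain := loop_inv s (s.toList.length - 1) le_rfl
  simp only [hmain]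
  cases hfb : findBackCS s.toList (s.toList.length - 1) with
  | none => rfl
  | some j =>
    obtain ⟨hjk, hjC, hjS⟩ := findBackCS_sound s.toList (s.toList.length - 1) j hfb
    have hj1 : j + 1 < s.toList.length := by omega
    show hack s (j : Int) = _
    apply String.toList_inj.mp
    rw [hack_eq s j hj1, String.toList_ofList]
    unfold swapAt
    rw [hjC, hjS, PySem.List.slice_to_natCast,
        show (j : Int) + 2 = ((j + 2 : Nat) : Int) by push_cast; ring,
        PySem.List.slice_from_natCast]
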